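-- pv_equiv track=rewrite | github.com/vicelab/Sliding_Racetrack | RaceTrack.py | recombineMission
-- ===== SOURCE A (Python) =====
-- def recombineMission(inbetween, navwpts, anomalies):
--     line = inbetween[0].pop(0)[0]         # get the header string
--     counter = 0
--     for a in range( len(navwpts) ):
--
--         for l in range( len(inbetween[a]) ):
--             line = line + '%d' % counter                # this overwrites the old waypoint number
--             counter += 1
--             #line = line + inbetween[a][l][0]
--             for v in range( 1, len(inbetween[a][l] )):
--                 line = line + '\t' + inbetween[a][l][v]
--
--         for l in range( 1, len(navwpts[a]) ):
--             line = line + '%d' % counter                # this overwrites the old waypoint number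
--             counter += 1
--             #line = line + navwpts[a][l][0]
--             for v in range( 1, len(navwpts[a][l] )):
--                 line = line + '\t' + navwpts[a][l][v]
--
--         for l in range( len(anomalies[a]) ):
--             line = line + '%d' % counter                # this overwrites the old waypoint number
--             counter += 1
--             #line = line + anomalies[a][l][0]
--             for v in range( 1, len(anomalies[a][l] )):
--                 line = line + '\t' + anomalies[a][l][v]
--     return line
-- ===== SOURCE B (Python) =====
-- def recombineMission(inbetween, navwpts, anomalies):
--     # Note: like the original, this pops the header record off inbetween[0] (in-place mutation).
--     header = inbetween[0].pop(0)[0]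
--     records = []
--     for a in range(len(navwpts)):
--         records.extend(inbetween[a])
--         records.extend(navwpts[a][1:])
--         records.extend(anomalies[a])
--     pieces = [header]
--     for counter, rec in enumerate(records):
--         pieces.append(str(counter) + ''.join('\t' + f for f in rec[1:]))
--     return ''.join(pieces)
-- ===== Notes on version B (the rewrite author's own statement) =====
-- stated objective: simpler
-- what changed: Replaces the triple-nested accumulate-into-one-string block structure by a flatten-then-single-pass shape: pop the header, build one flat list of records, then a single enumerate pass producing pieces joined once at the end; Pre_ excludes only inputs where A raises IndexError (empty inbetween/header record, or navwpts longer than inbetween or anomalies).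
import Mathlib
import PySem

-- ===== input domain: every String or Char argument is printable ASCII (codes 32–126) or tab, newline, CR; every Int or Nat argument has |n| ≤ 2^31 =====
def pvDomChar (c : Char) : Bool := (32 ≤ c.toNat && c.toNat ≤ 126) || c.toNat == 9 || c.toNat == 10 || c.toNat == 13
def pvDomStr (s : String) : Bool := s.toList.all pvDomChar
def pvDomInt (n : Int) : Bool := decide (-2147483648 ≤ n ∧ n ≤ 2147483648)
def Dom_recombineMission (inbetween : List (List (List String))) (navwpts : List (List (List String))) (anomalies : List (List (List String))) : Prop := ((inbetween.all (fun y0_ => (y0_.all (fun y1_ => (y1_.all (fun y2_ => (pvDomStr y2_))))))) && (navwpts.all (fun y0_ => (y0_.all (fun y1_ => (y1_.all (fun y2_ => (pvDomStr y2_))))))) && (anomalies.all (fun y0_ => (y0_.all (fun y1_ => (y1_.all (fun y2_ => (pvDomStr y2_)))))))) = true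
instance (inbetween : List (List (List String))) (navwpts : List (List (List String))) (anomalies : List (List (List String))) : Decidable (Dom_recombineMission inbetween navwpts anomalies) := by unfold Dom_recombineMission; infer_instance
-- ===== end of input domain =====

-- B flattens the records first and builds the result in one enumerate pass (simpler decomposition);
-- both programs pop the header record off inbetween[0] in place (return value is what is proved equal).

-- ===== PORT A =====
-- A's `inbetween[0].pop(0)` is modelled by reading inbetween[0] and continuing with
-- `inbetween.set 0 ((inbetween[0]).drop 1)` (the list after the pop); the popped record is `(inbetween[0]).getD 0`.
def recombineMission (inbetween : List (List (List String))) (navwpts : List (List (List String))) (anomalies : List (List (List String))) : String :=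
  let row0 := PySem.List.pyGetD inbetween 0 []
  let line := PySem.List.pyGetD (PySem.List.pyGetD row0 0 []) 0 ""   -- inbetween[0].pop(0)[0]
  let ib := inbetween.set 0 (row0.drop 1)                            -- inbetween after the pop
  let st := (PySem.List.pyRange 0 (PySem.List.len navwpts) 1).foldl (fun (st : String × Int) a =>
    let st := (PySem.List.pyRange 0 (PySem.List.len (PySem.List.pyGetD ib a [])) 1).foldl (fun (st : String × Int) l =>
      let r := PySem.List.pyGetD (PySem.List.pyGetD ib a []) l []
      let ln := st.1 ++ PySem.Int.toStr st.2
      let ln := (PySem.List.pyRange 1 (PySem.List.len r) 1).foldl (fun ln v => ln ++ "\t" ++ PySem.List.pyGetD r v "") ln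
      (ln, st.2 + 1)) st
    let st := (PySem.List.pyRange 1 (PySem.List.len (PySem.List.pyGetD navwpts a [])) 1).foldl (fun (st : String × Int) l =>
      let r := PySem.List.pyGetD (PySem.List.pyGetD navwpts a []) l []
      let ln := st.1 ++ PySem.Int.toStr st.2
      let ln := (PySem.List.pyRange 1 (PySem.List.len r) 1).foldl (fun ln v => ln ++ "\t" ++ PySem.List.pyGetD r v "") ln
      (ln, st.2 + 1)) st
    let st := (PySem.List.pyRange 0 (PySem.List.len (PySem.List.pyGetD anomalies a [])) 1).foldl (fun (st : String × Int) l =>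
      let r := PySem.List.pyGetD (PySem.List.pyGetD anomalies a []) l []
      let ln := st.1 ++ PySem.Int.toStr st.2
      let ln := (PySem.List.pyRange 1 (PySem.List.len r) 1).foldl (fun ln v => ln ++ "\t" ++ PySem.List.pyGetD r v "") ln
      (ln, st.2 + 1)) st
    st) (line, 0)
  st.1

-- ===== PORT B =====
-- B's `navwpts[a][1:]` is ported as `.drop 1` (exact: a [1:] slice of a list is its tail).
def recombineMission_alt (inbetween : List (List (List String))) (navwpts : List (List (List String))) (anomalies : List (List (List String))) : String :=
  let row0 := PySem.List.pyGetD inbetween 0 []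
  let header := PySem.List.pyGetD (PySem.List.pyGetD row0 0 []) 0 ""
  let ib := inbetween.set 0 (row0.drop 1)
  let records := (PySem.List.pyRange 0 (PySem.List.len navwpts) 1).foldl (fun (acc : List (List String)) a =>
    acc ++ PySem.List.pyGetD ib a [] ++ (PySem.List.pyGetD navwpts a []).drop 1 ++ PySem.List.pyGetD anomalies a []) []
  let pieces := (PySem.List.enumerate records 0).foldl (fun (ps : List String) (p : Int × List String) =>
    ps ++ [PySem.Int.toStr p.1 ++ PySem.Str.join "" ((p.2.drop 1).map (fun f => "\t" ++ f))]) [header]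
  PySem.Str.join "" pieces

-- ===== PRECONDITION & SPEC =====
-- Pre_ excludes exactly the inputs where A raises IndexError: empty inbetween, empty inbetween[0],
-- empty first record of inbetween[0], or navwpts longer than inbetween or anomalies.
def Pre_recombineMission (inbetween : List (List (List String))) (navwpts : List (List (List String))) (anomalies : List (List (List String))) : Prop :=
  inbetween ≠ [] ∧ inbetween.getD 0 [] ≠ [] ∧ (inbetween.getD 0 []).getD 0 [] ≠ [] ∧
  navwpts.length ≤ inbetween.length ∧ navwpts.length ≤ anomalies.length
instance (inbetween : List (List (List String))) (navwpts : List (List (List String))) (anomalies : List (List (List String))) : Decidable (Pre_recombineMission inbetween navwpts anomalies) := by unfold Pre_recombineMission; infer_instance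

def pvWitness_recombineMission : List (List (List String)) × List (List (List String)) × List (List (List String)) :=
  ([[["hdr", "x"]], [["n0"], ["p", "q"]]], [[], [["w0"], ["w1", "f1", "f2"]]], [[["a1", "z"]], []])

def Spec_recombineMission (inbetween : List (List (List String))) (navwpts : List (List (List String))) (anomalies : List (List (List String))) (out : String) : Prop := out = recombineMission_alt inbetween navwpts anomalies
instance (inbetween : List (List (List String))) (navwpts : List (List (List String))) (anomalies : List (List (List String))) (out : String) : Decidable (Spec_recombineMission inbetween navwpts anomalies out) := by unfold Spec_recombineMission; infer_instance

-- ===== CLAIM (what is proved, stated in full; the proofs are below) =====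
def Claim_equal_recombineMission : Prop := ∀ (inbetween : List (List (List String))) (navwpts : List (List (List String))) (anomalies : List (List (List String))), Dom_recombineMission inbetween navwpts anomalies → Pre_recombineMission inbetween navwpts anomalies → Spec_recombineMission inbetween navwpts anomalies (recombineMission inbetween navwpts anomalies)

-- ===== LEMMAS AND PROOFS =====

-- The string produced for one record: its counter followed by tab-prefixed tail fields.
def pvRecStr (c : Int) (r : List String) : String :=
  PySem.Int.toStr c ++ PySem.Str.join "" ((r.drop 1).map (fun f => "\t" ++ f))

-- One record step of A's accumulation: append the record string, bump the counter.
def pvStep (st : String × Int) (r : List String) : String × Int :=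
  (st.1 ++ pvRecStr st.2 r, st.2 + 1)

theorem pv_flat_inter (L : List (List Char)) :
    (List.intersperse ([] : List Char) L).flatten = L.flatten := by
  induction L with
  | nil => rfl
  | cons a t ih =>
    cases t with
    | nil => rfl
    | cons b u => simp_all [List.intersperse]

theorem pv_join_nil_cons (x : String) (l : List String) :
    PySem.Str.join "" (x :: l) = x ++ PySem.Str.join "" l := by
  simp [PySem.Str.join, PySem.Chars.join, List.intercalate, pv_flat_inter,
    String.ofList_append, String.ofList_toList]

theorem pv_join_nil_nil : PySem.Str.join "" ([] : List String) = "" := by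
  simp [PySem.Str.join]

theorem pv_tab_fold (l : List String) (ln : String) :
    l.foldl (fun ln f => ln ++ "\t" ++ f) ln
      = ln ++ PySem.Str.join "" (l.map (fun f => "\t" ++ f)) := by
  induction l generalizing ln with
  | nil => simp [pv_join_nil_nil]
  | cons x t ih => rw [List.foldl_cons, ih, List.map_cons, pv_join_nil_cons]; simp [String.append_assoc]

theorem pv_inner (r : List String) (ln : String) :
    (PySem.List.pyRange 1 (PySem.List.len r) 1).foldl
        (fun ln v => ln ++ "\t" ++ PySem.List.pyGetD r v "") ln
      = ln ++ PySem.Str.join "" ((r.drop 1).map (fun f => "\t" ++ f)) := by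
  rw [PySem.List.foldl_pyRange_pyGetD r "" (fun ln f => ln ++ "\t" ++ f) ln (by norm_num)]
  exact pv_tab_fold _ _

theorem pv_body_eq :
    (fun (st : String × Int) (r : List String) =>
        ((PySem.List.pyRange 1 (PySem.List.len r) 1).foldl
            (fun ln v => ln ++ "\t" ++ PySem.List.pyGetD r v "") (st.1 ++ PySem.Int.toStr st.2),
          st.2 + 1))
      = pvStep := by
  funext st r
  rw [pv_inner]
  simp [pvStep, pvRecStr, String.append_assoc]

theorem pv_blockZ (xs : List (List String)) (st : String × Int) :
    (PySem.List.pyRange 0 (PySem.List.len xs) 1).foldl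
        (fun st l =>
          ((PySem.List.pyRange 1 (PySem.List.len (PySem.List.pyGetD xs l [])) 1).foldl
              (fun ln v => ln ++ "\t" ++ PySem.List.pyGetD (PySem.List.pyGetD xs l []) v "")
              (st.1 ++ PySem.Int.toStr st.2),
            st.2 + 1)) st
      = xs.foldl pvStep st := by
  rw [← pv_body_eq]
  exact PySem.List.foldl_pyRange_zero_pyGetD xs []
    (fun (st : String × Int) (r : List String) =>
      ((PySem.List.pyRange 1 (PySem.List.len r) 1).foldl
          (fun ln v => ln ++ "\t" ++ PySem.List.pyGetD r v "") (st.1 ++ PySem.Int.toStr st.2),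
        st.2 + 1)) st

theorem pv_blockOne (xs : List (List String)) (st : String × Int) :
    (PySem.List.pyRange 1 (PySem.List.len xs) 1).foldl
        (fun st l =>
          ((PySem.List.pyRange 1 (PySem.List.len (PySem.List.pyGetD xs l [])) 1).foldl
              (fun ln v => ln ++ "\t" ++ PySem.List.pyGetD (PySem.List.pyGetD xs l []) v "")
              (st.1 ++ PySem.Int.toStr st.2),
            st.2 + 1)) st
      = (xs.drop 1).foldl pvStep st := by
  rw [← pv_body_eq]
  exact PySem.List.foldl_pyRange_pyGetD xs []
    (fun (st : String × Int) (r : List String) =>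
      ((PySem.List.pyRange 1 (PySem.List.len r) 1).foldl
          (fun ln v => ln ++ "\t" ++ PySem.List.pyGetD r v "") (st.1 ++ PySem.Int.toStr st.2),
        st.2 + 1)) st (a := 1) (by norm_num)

theorem pv_fold_char (rs : List (List String)) (line : String) (c : Int) :
    rs.foldl pvStep (line, c)
      = (line ++ PySem.Str.join "" ((PySem.List.enumerate rs c).map (fun p => pvRecStr p.1 p.2)),
          c + rs.length) := by
  induction rs generalizing line c with
  | nil => simp [PySem.List.enumerate_nil, pv_join_nil_nil]
  | cons r t ih =>
    simp only [List.foldl_cons, pvStep, ih, PySem.List.enumerate_cons, List.map_cons,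
      pv_join_nil_cons, String.append_assoc, List.length_cons]
    refine Prod.ext rfl ?_
    push_cast; ring

theorem pv_outer (g1 g2 g3 : Int → List (List String)) (L : List Int) (st : String × Int) :
    L.foldl (fun st a => (g3 a).foldl pvStep ((g2 a).foldl pvStep ((g1 a).foldl pvStep st))) st
      = (L.flatMap (fun a => g1 a ++ g2 a ++ g3 a)).foldl pvStep st := by
  induction L generalizing st with
  | nil => rfl
  | cons a t ih => simp [List.foldl_append, ih]

theorem pv_records (g1 g2 g3 : Int → List (List String)) (L : List Int)
    (acc : List (List String)) :
    L.foldl (fun acc a => acc ++ g1 a ++ g2 a ++ g3 a) acc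
      = acc ++ L.flatMap (fun a => g1 a ++ g2 a ++ g3 a) := by
  induction L generalizing acc with
  | nil => simp
  | cons a t ih => rw [List.foldl_cons, ih, List.flatMap_cons]; simp [List.append_assoc]

-- ===== VERDICT (by name: the statement is the Claim_ definition above) =====
theorem recombineMission_spec : Claim_equal_recombineMission := by
  intro ib nv an _ _
  unfold Spec_recombineMission recombineMission recombineMission_alt
  simp only [pv_blockZ, pv_blockOne, pv_outer, pv_records,
    PySem.List.foldl_append_singleton_eq_map, List.nil_append, List.singleton_append,
    pv_fold_char, pv_join_nil_cons, pvRecStr]
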